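-- pv_equiv track=rewrite | github.com/RickBarretto/trying-some-mvc | src/menus/use_cases/request.py | _is_valid_cpf
-- ===== SOURCE A (Python) =====
-- def _is_valid_cpf(entry: str) -> bool:
--
--     fields = entry.replace("-", ".").split(".")
--
--     # Verifica os separadores
--
--     # Os respectivos separadores devem estar em
--     # XXX.XXX.XXX-XX
--     #    ^   ^   ^
--     #    3   7   11
--
--     has_dot_at_index_3_and_7 = [3, 7] == [index for index, char in enumerate(entry) if char == "."]
--     has_dash_at_index_11 = [11] == [index for index, char in enumerate(entry) if char == "-"]
--
--     # Verifica os campos de preenchimento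
--     try:
--         has_4_fields                = 4 == len(fields)
--         all_fields_are_digits       = all((field.isdigit() for field in fields))
--         first_3_fields_has_3_digits = all((3 == len(field) for field in fields[0:3]))
--         last_field_has_2_digits     = 2 == len(fields[-1])
--     except IndexError:
--         return False
--
--     return all((
--         has_dot_at_index_3_and_7,
--         has_dash_at_index_11,
--         has_4_fields,
--         all_fields_are_digits,
--         first_3_fields_has_3_digits,
--         last_field_has_2_digits
--     ))
-- ===== SOURCE B (Python) =====
-- def _is_valid_cpf(entry: str) -> bool:
--     if len(entry) != 14:
--         return False
--     for index, char in enumerate(entry):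
--         if index == 3 or index == 7:
--             if char != ".":
--                 return False
--         elif index == 11:
--             if char != "-":
--                 return False
--         elif not char.isdigit():
--             return False
--     return True
-- ===== Notes on version B (the rewrite author's own statement) =====
-- stated objective: simpler
-- what changed: B validates positionally in one short-circuiting pass over enumerate(entry) behind a len==14 gate, instead of A's replace/split into fields plus two separate enumerate comprehensions for the separator positions.
import Mathlib
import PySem

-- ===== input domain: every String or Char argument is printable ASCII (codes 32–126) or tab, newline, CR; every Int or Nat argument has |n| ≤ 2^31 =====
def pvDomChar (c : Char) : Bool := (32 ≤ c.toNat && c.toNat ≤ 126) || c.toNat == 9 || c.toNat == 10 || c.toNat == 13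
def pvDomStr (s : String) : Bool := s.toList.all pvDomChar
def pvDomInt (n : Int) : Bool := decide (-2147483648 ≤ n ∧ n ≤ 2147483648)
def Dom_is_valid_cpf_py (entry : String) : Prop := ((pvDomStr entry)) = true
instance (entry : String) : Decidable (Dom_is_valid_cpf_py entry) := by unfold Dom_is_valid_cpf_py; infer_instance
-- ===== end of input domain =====

-- B validates the CPF mask in one positional pass (len == 14, '.' at 3 and 7, '-' at 11,
-- digits elsewhere) instead of A's replace/split into fields plus two separator-position
-- comprehensions; same return value on every input, no side effects in either version.

-- ===== PORT A =====
-- literal transliteration of A (replace/split + two enumerate comprehensions; the try/except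
-- is the match on fields[-1], the only expression there that can raise IndexError)
def is_valid_cpf_py (entry : String) : Bool :=
  let s := entry.toList
  let fields := PySem.Chars.splitOn (PySem.Chars.replace s ['-'] ['.']) ['.']
  let has_dot_at_index_3_and_7 :=
    decide (([3, 7] : List Int)
      = (((PySem.List.enumerate s).filter (fun p => p.2 == '.')).map (fun p => p.1)))
  let has_dash_at_index_11 :=
    decide (([11] : List Int)
      = (((PySem.List.enumerate s).filter (fun p => p.2 == '-')).map (fun p => p.1)))
  let has_4_fields := decide ((4 : Int) = fields.length)
  let all_fields_are_digits := fields.all PySem.Chars.strIsdigit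
  let first_3_fields_has_3_digits :=
    (PySem.List.slice fields (some 0) (some 3)).all (fun f => decide ((3 : Int) = f.length))
  match PySem.List.pyGet? fields (-1) with
  | none => false
  | some lastf =>
    let last_field_has_2_digits := decide ((2 : Int) = lastf.length)
    has_dot_at_index_3_and_7 && has_dash_at_index_11 && has_4_fields
      && all_fields_are_digits && first_3_fields_has_3_digits && last_field_has_2_digits

-- ===== PORT B =====
-- literal transliteration of B (length gate + one positional pass; the early returns are the .all)
def is_valid_cpf_py_alt (entry : String) : Bool :=
  let s := entry.toList
  if s.length ≠ 14 then false
  else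
    (PySem.List.enumerate s).all (fun p =>
      if p.1 == 3 || p.1 == 7 then p.2 == '.'
      else if p.1 == 11 then p.2 == '-'
      else PySem.Chars.isdigit p.2)


-- ===== PRECONDITION & SPEC =====
def Spec_is_valid_cpf_py (entry : String) (out : Bool) : Prop := out = is_valid_cpf_py_alt entry
instance (entry : String) (out : Bool) : Decidable (Spec_is_valid_cpf_py entry out) := by unfold Spec_is_valid_cpf_py; infer_instance

-- ===== CLAIM (what is proved, stated in full; the proofs are below) =====
def Claim_equal_is_valid_cpf_py : Prop := ∀ (entry : String), Dom_is_valid_cpf_py entry → Spec_is_valid_cpf_py entry (is_valid_cpf_py entry)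

-- ===== LEMMAS AND PROOFS =====
-- Both ports are shown equal (as `= true` iffs) to the canonical mask `Shape`;
-- the A side goes through characterizations of single-char replace/split (fuel
-- recursions in PySem) and of the separator-position lists (`occIdx`).

def Shape (s : List Char) : Prop :=
  ∃ x0 x1 x2 x3 : List Char,
    s = x0 ++ '.' :: (x1 ++ '.' :: (x2 ++ '-' :: x3)) ∧
    x0.length = 3 ∧ x1.length = 3 ∧ x2.length = 3 ∧ x3.length = 2 ∧
    ((x0 ++ x1 ++ x2 ++ x3).all PySem.Chars.isdigit = true)

def occIdx (ch : Char) : List Char → Int → List Int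
  | [], _ => []
  | c :: rest, t => if c = ch then t :: occIdx ch rest (t + 1) else occIdx ch rest (t + 1)

theorem enumFilter_eq (ch : Char) (l : List Char) (t : Int) :
    (((PySem.List.enumerate l t).filter (fun p => p.2 == ch)).map (fun p => p.1)) = occIdx ch l t := by
  induction l generalizing t with
  | nil => simp [PySem.List.enumerate_nil, occIdx]
  | cons c rest ih =>
    by_cases h : c = ch <;>
      simp [PySem.List.enumerate_cons, occIdx, h, ih]

theorem occIdx_append (ch : Char) (x y : List Char) (t : Int) :
    occIdx ch (x ++ y) t = occIdx ch x t ++ occIdx ch y (t + x.length) := by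
  induction x generalizing t with
  | nil => simp [occIdx]
  | cons c rest ih =>
    by_cases h : c = ch <;> simp [occIdx, h, ih] <;> ring_nf

theorem occIdx_nil_iff (ch : Char) (l : List Char) (t : Int) :
    occIdx ch l t = [] ↔ ch ∉ l := by
  induction l generalizing t with
  | nil => simp [occIdx]
  | cons c rest ih =>
    by_cases h : c = ch
    · simp [occIdx, h]
    · simp [occIdx, h, ih]
      exact fun _ hh => h hh.symm

theorem occIdx_cons_elim (ch : Char) (l : List Char) (t i : Int) (rest : List Int)
    (h : occIdx ch l t = i :: rest) :
    ∃ x y, l = x ++ ch :: y ∧ ch ∉ x ∧ (x.length : Int) = i - t ∧ occIdx ch y (i + 1) = rest := by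
  induction l generalizing t with
  | nil => simp [occIdx] at h
  | cons c tl ih =>
    by_cases hc : c = ch
    · subst hc
      simp [occIdx] at h
      refine ⟨[], tl, by simp, by simp, by simp [h.1], ?_⟩
      rw [h.1] at h ⊢
      exact h.2
    · simp [occIdx, hc] at h
      obtain ⟨x, y, rfl, hx, hlen, hrest⟩ := ih (t + 1) h
      refine ⟨c :: x, y, by simp, by simp [hx]; exact fun hh => hc hh.symm,
        by simp; push_cast [hlen]; omega, hrest⟩

theorem replace_go_single (a b : Char) :
    ∀ (fuel : Nat) (l acc : List Char), l.length ≤ fuel →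
      PySem.Chars.replace.go [a] [b] fuel l acc
        = acc.reverse ++ l.map (fun c => if c = a then b else c) := by
  intro fuel
  induction fuel with
  | zero =>
    intro l acc h
    obtain rfl : l = [] := List.length_eq_zero_iff.mp (by omega)
    simp [PySem.Chars.replace.go]
  | succ n ih =>
    intro l acc h
    cases l with
    | nil => simp [PySem.Chars.replace.go]
    | cons c t =>
      have hlt : t.length ≤ n := by simpa using h
      by_cases hc : a = c
      · subst hc
        have hpre : [a].isPrefixOf (a :: t) = true := by simp [List.isPrefixOf]
        simp only [PySem.Chars.replace.go, hpre, if_true]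
        rw [show List.drop [a].length (a :: t) = t from rfl, ih _ _ hlt]
        simp
      · have hpre : [a].isPrefixOf (c :: t) = false := by simp [List.isPrefixOf]; exact hc
        simp only [PySem.Chars.replace.go, hpre, Bool.false_eq_true, if_false]
        rw [ih _ _ hlt]
        have hca : ¬ c = a := fun hh => hc hh.symm
        simp [hca]

theorem replace_single (a b : Char) (l : List Char) :
    PySem.Chars.replace l [a] [b] = l.map (fun c => if c = a then b else c) := by
  simp [PySem.Chars.replace, replace_go_single a b l.length l []]

def mySplit (sep : Char) : List Char → List (List Char)
  | [] => [[]]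
  | c :: rest => if c = sep then [] :: mySplit sep rest else (mySplit sep rest).modifyHead (c :: ·)

theorem splitOn_go_single (sep : Char) :
    ∀ (fuel : Nat) (l cur : List Char) (acc : List (List Char)), l.length < fuel →
      PySem.Chars.splitOn.go [sep] fuel l cur acc
        = acc.reverse ++ (mySplit sep l).modifyHead (cur.reverse ++ ·) := by
  intro fuel
  induction fuel with
  | zero => intro l cur acc h; omega
  | succ n ih =>
    intro l cur acc h
    cases l with
    | nil => simp [PySem.Chars.splitOn.go, mySplit]
    | cons c t =>
      have hlt : t.length < n := by simpa using h
      by_cases hc : c = sep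
      · subst hc
        have hpre : [c].isPrefixOf (c :: t) = true := by simp [List.isPrefixOf]
        simp only [PySem.Chars.splitOn.go, hpre, if_true]
        rw [show List.drop [c].length (c :: t) = t from rfl, ih _ _ _ hlt]
        simp only [mySplit]
        cases mySplit c t <;> simp
      · have hpre : [sep].isPrefixOf (c :: t) = false := by
          simp [List.isPrefixOf]; exact fun hh => hc hh.symm
        simp only [PySem.Chars.splitOn.go, hpre, Bool.false_eq_true, if_false]
        rw [ih _ _ _ hlt]
        simp only [mySplit, if_neg hc]
        cases mySplit sep t <;> simp

theorem splitOn_single (sep : Char) (l : List Char) :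
    PySem.Chars.splitOn l [sep] = mySplit sep l := by
  rw [PySem.Chars.splitOn, splitOn_go_single sep _ _ _ _ (by omega)]
  cases mySplit sep l <;> simp

theorem mySplit_no_sep (sep : Char) (y : List Char) (hy : sep ∉ y) :
    mySplit sep y = [y] := by
  induction y with
  | nil => simp [mySplit]
  | cons c t ih =>
    simp at hy
    rw [mySplit, if_neg (fun hh => hy.1 hh.symm), ih hy.2]
    simp

theorem mySplit_append (sep : Char) (x y : List Char) (hx : sep ∉ x) :
    mySplit sep (x ++ sep :: y) = x :: mySplit sep y := by
  induction x with
  | nil => simp [mySplit]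
  | cons c t ih =>
    simp at hx
    rw [List.cons_append, mySplit, if_neg (fun hh => hx.1 hh.symm), ih hx.2]
    simp

theorem digit_ne (c : Char) (h : PySem.Chars.isdigit c = true) : c ≠ '.' ∧ c ≠ '-' := by
  refine ⟨?_, ?_⟩ <;> rintro rfl <;> exact absurd h (by decide)

-- fields of a Shape-decomposed string
theorem fields_of_decomp (x0 x1 x2 x3 : List Char)
    (hd0 : '.' ∉ x0) (hd1 : '.' ∉ x1) (hd2 : '.' ∉ x2) (hd3 : '.' ∉ x3)
    (hh0 : '-' ∉ x0) (hh1 : '-' ∉ x1) (hh2 : '-' ∉ x2) (hh3 : '-' ∉ x3) :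
    PySem.Chars.splitOn
      (PySem.Chars.replace (x0 ++ '.' :: (x1 ++ '.' :: (x2 ++ '-' :: x3))) ['-'] ['.']) ['.']
      = [x0, x1, x2, x3] := by
  rw [replace_single, splitOn_single]
  have hmap : ∀ (x : List Char), '-' ∉ x →
      x.map (fun c => if c = '-' then '.' else c) = x := by
    intro x hx
    rw [List.map_congr_left (fun c hc => if_neg (fun hh => hx (by rwa [hh] at hc)))]
    simp
  simp only [List.map_append, List.map_cons, hmap x0 hh0, hmap x1 hh1, hmap x2 hh2, hmap x3 hh3,
    if_neg (by decide : ¬ ('.' : Char) = '-')]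
  rw [if_pos trivial, mySplit_append _ _ _ hd0, mySplit_append _ _ _ hd1, mySplit_append _ _ _ hd2,
    mySplit_no_sep _ _ hd3]

theorem occIdx_no (ch : Char) (x y : List Char) (t : Int) (h : ch ∉ x) :
    occIdx ch (x ++ ch :: y) t = (t + x.length) :: occIdx ch y (t + x.length + 1) := by
  rw [occIdx_append, (occIdx_nil_iff ch x t).mpr h]
  simp [occIdx]

theorem occIdx_skip (ch c : Char) (x y : List Char) (t : Int) (h : ch ∉ x) (hc : ¬ c = ch) :
    occIdx ch (x ++ c :: y) t = occIdx ch y (t + x.length + 1) := by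
  rw [occIdx_append, (occIdx_nil_iff ch x t).mpr h]
  simp [occIdx, hc]

theorem pyGet_four {α : Type} (a b c d : α) :
    PySem.List.pyGet? [a, b, c, d] (-1) = some d := by
  simp [PySem.List.pyGet?, PySem.List.pyIdx?]

theorem A_iff_shape (entry : String) : is_valid_cpf_py entry = true ↔ Shape entry.toList := by
  unfold is_valid_cpf_py
  dsimp only
  generalize entry.toList = s
  constructor
  · intro hA
    rcases hget : PySem.List.pyGet?
        (PySem.Chars.splitOn (PySem.Chars.replace s ['-'] ['.']) ['.']) (-1) with _ | lastf <;>
      rw [hget] at hA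
    · exact absurd hA (by simp)
    simp only [Bool.and_eq_true, decide_eq_true_eq] at hA
    obtain ⟨⟨⟨⟨⟨hdot, hdash⟩, h4⟩, hdig⟩, h3⟩, h2⟩ := hA
    rw [enumFilter_eq] at hdot hdash
    obtain ⟨x0, y, rfl, hnd0, hl0, hrest⟩ := occIdx_cons_elim '.' s 0 3 [7] hdot.symm
    obtain ⟨x1, y2, rfl, hnd1, hl1, hrest2⟩ := occIdx_cons_elim '.' y (3 + 1) 7 [] hrest
    have hndy2 : '.' ∉ y2 := (occIdx_nil_iff '.' y2 (7 + 1)).mp hrest2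
    obtain ⟨z, w, hzw, hnhz, hlz, hrw⟩ := occIdx_cons_elim '-' _ 0 11 [] hdash.symm
    have hnhw : '-' ∉ w := (occIdx_nil_iff '-' w (11 + 1)).mp hrw
    have hx0 : x0.length = 3 := by omega
    have hx1 : x1.length = 3 := by omega
    have hzl : z.length = 11 := by omega
    have hslen := congrArg List.length hzw
    simp only [List.length_append, List.length_cons] at hslen
    have hy2len : 3 ≤ y2.length := by omega
    obtain ⟨x2, rfl, hx2len, hzeq⟩ :
        ∃ x2, y2 = x2 ++ '-' :: w ∧ x2.length = 3 ∧ x0 ++ '.' :: (x1 ++ '.' :: x2) = z := by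
      have hzw' : (x0 ++ '.' :: (x1 ++ '.' :: y2.take 3)) ++ y2.drop 3 = z ++ '-' :: w := by
        calc (x0 ++ '.' :: (x1 ++ '.' :: y2.take 3)) ++ y2.drop 3
            = x0 ++ '.' :: (x1 ++ '.' :: (y2.take 3 ++ y2.drop 3)) := by
              simp [List.append_assoc]
          _ = x0 ++ '.' :: (x1 ++ '.' :: y2) := by rw [List.take_append_drop]
          _ = z ++ '-' :: w := hzw
      obtain ⟨hzeq, hdw⟩ := List.append_inj hzw' (by simp [hx0, hx1, hzl]; omega)
      exact ⟨y2.take 3, by rw [← hdw, List.take_append_drop], by simp; omega, hzeq⟩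
    have hnd2 : '.' ∉ x2 := fun hc => hndy2 (by simp [hc])
    have hnd3 : '.' ∉ w := fun hc => hndy2 (by simp [hc])
    have hh0 : '-' ∉ x0 := fun hc => hnhz (by rw [← hzeq]; simp [hc])
    have hh1 : '-' ∉ x1 := fun hc => hnhz (by rw [← hzeq]; simp [hc])
    have hh2 : '-' ∉ x2 := fun hc => hnhz (by rw [← hzeq]; simp [hc])
    rw [fields_of_decomp x0 x1 x2 w hnd0 hnd1 hnd2 hnd3 hh0 hh1 hh2 hnhw] at hget hdig
    rw [pyGet_four] at hget
    obtain rfl : w = lastf := Option.some_inj.mp hget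
    simp only [PySem.Chars.strIsdigit, List.all_cons, List.all_nil, Bool.and_eq_true] at hdig
    refine ⟨x0, x1, x2, w, rfl, hx0, hx1, hx2len, by omega, ?_⟩
    simp only [List.all_append, Bool.and_eq_true]
    exact ⟨⟨⟨hdig.1.2, hdig.2.1.2⟩, hdig.2.2.1.2⟩, hdig.2.2.2.1.2⟩
  · rintro ⟨x0, x1, x2, x3, rfl, h0, h1, h2, h3, hdig⟩
    simp only [List.all_append, Bool.and_eq_true] at hdig
    obtain ⟨⟨⟨hg0, hg1⟩, hg2⟩, hg3⟩ := hdig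
    have nd : ∀ (x : List Char), x.all PySem.Chars.isdigit = true → '.' ∉ x ∧ '-' ∉ x := by
      intro x hx
      constructor <;> intro hc
      · exact (digit_ne _ (List.all_eq_true.mp hx _ hc)).1 rfl
      · exact (digit_ne _ (List.all_eq_true.mp hx _ hc)).2 rfl
    have hdotv : occIdx '.' (x0 ++ '.' :: (x1 ++ '.' :: (x2 ++ '-' :: x3))) 0 = [3, 7] := by
      rw [occIdx_no _ _ _ _ (nd x0 hg0).1, occIdx_no _ _ _ _ (nd x1 hg1).1,
        occIdx_skip _ _ _ _ _ (nd x2 hg2).1 (by decide),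
        (occIdx_nil_iff _ _ _).mpr (nd x3 hg3).1]
      norm_num [h0, h1]
    have hdashv : occIdx '-' (x0 ++ '.' :: (x1 ++ '.' :: (x2 ++ '-' :: x3))) 0 = [11] := by
      rw [occIdx_skip _ _ _ _ _ (nd x0 hg0).2 (by decide),
        occIdx_skip _ _ _ _ _ (nd x1 hg1).2 (by decide),
        occIdx_no _ _ _ _ (nd x2 hg2).2,
        (occIdx_nil_iff _ _ _).mpr (nd x3 hg3).2]
      norm_num [h0, h1, h2]
    rw [enumFilter_eq, enumFilter_eq, hdotv, hdashv,
      fields_of_decomp x0 x1 x2 x3 (nd x0 hg0).1 (nd x1 hg1).1 (nd x2 hg2).1 (nd x3 hg3).1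
        (nd x0 hg0).2 (nd x1 hg1).2 (nd x2 hg2).2 (nd x3 hg3).2, pyGet_four]
    have ne0 : x0 ≠ [] := by intro hh; rw [hh] at h0; simp at h0
    have ne1 : x1 ≠ [] := by intro hh; rw [hh] at h1; simp at h1
    have ne2 : x2 ≠ [] := by intro hh; rw [hh] at h2; simp at h2
    have ne3 : x3 ≠ [] := by intro hh; rw [hh] at h3; simp at h3
    have hs4 : PySem.List.slice [x0, x1, x2, x3] none (some 3) = [x0, x1, x2] := by
      simp [PySem.List.slice, PySem.List.clampIdx]
    simp [PySem.Chars.strIsdigit, hg0, hg1, hg2, hg3, ne0, ne1, ne2, ne3, h0, h1, h2, h3, hs4]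

theorem B_iff_shape (entry : String) : is_valid_cpf_py_alt entry = true ↔ Shape entry.toList := by
  unfold is_valid_cpf_py_alt
  generalize entry.toList = s
  constructor
  · intro h
    by_cases hl : s.length = 14
    · rw [if_neg (by omega)] at h
      rcases s with _|⟨c0,_|⟨c1,_|⟨c2,_|⟨c3,_|⟨c4,_|⟨c5,_|⟨c6,_|⟨c7,_|⟨c8,_|⟨c9,_|⟨c10,_|⟨c11,_|⟨c12,_|⟨c13,rest⟩⟩⟩⟩⟩⟩⟩⟩⟩⟩⟩⟩⟩⟩ <;> try (exfalso; simp only [List.length_cons, List.length_nil] at hl; omega)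
      obtain rfl : rest = [] := by simp only [List.length_cons, List.length_nil] at hl; simpa using List.length_eq_zero_iff.mp (by omega)
      simp [PySem.List.enumerate_cons, PySem.List.enumerate_nil] at h
      obtain ⟨g0,g1,g2,g3,g4,g5,g6,g7,g8,g9,g10,g11,g12,g13⟩ := h
      exact ⟨[c0,c1,c2],[c4,c5,c6],[c8,c9,c10],[c12,c13], by simp_all, rfl, rfl, rfl, rfl, by simp_all⟩
    · rw [if_pos hl] at h
      exact absurd h (by simp)
  · rintro ⟨x0, x1, x2, x3, rfl, h0, h1, h2, h3, hdig⟩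
    rcases x0 with _|⟨a0,_|⟨a1,_|⟨a2,_|⟨a4,x0⟩⟩⟩⟩ <;> simp_all
    rcases x1 with _|⟨b0,_|⟨b1,_|⟨b2,_|⟨b4,x1⟩⟩⟩⟩ <;> simp_all
    rcases x2 with _|⟨c0,_|⟨c1,_|⟨c2,_|⟨c4,x2⟩⟩⟩⟩ <;> simp_all
    rcases x3 with _|⟨d0,_|⟨d1,_|⟨d2,x3⟩⟩⟩ <;> simp_all
    rintro a b (⟨rfl,rfl⟩|⟨rfl,rfl⟩|⟨rfl,rfl⟩|⟨rfl,rfl⟩|⟨rfl,rfl⟩|⟨rfl,rfl⟩|⟨rfl,rfl⟩|⟨rfl,rfl⟩|⟨rfl,rfl⟩|⟨rfl,rfl⟩) <;> simp_all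

-- ===== VERDICT (by name: the statement is the Claim_ definition above) =====
theorem is_valid_cpf_py_spec : Claim_equal_is_valid_cpf_py := by
  intro entry _
  unfold Spec_is_valid_cpf_py
  rw [Bool.eq_iff_iff]
  rw [A_iff_shape, B_iff_shape]
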